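-- pv_equiv track=rewrite | github.com/slntkllr01/TUBES-DASPRO | function.py | geser_array
-- ===== SOURCE A (Python) =====
-- def array_length(arr):
--     count = 0
--     temp_arr = []
--     while(temp_arr != arr):
--         count += 1
--         # Inisialisasi array pembanding
--         temp_arr = [0 for i in range(count)]
--         for i in range(count):
--             temp_arr[i] = arr[i]
--     return count
--
-- def geser_array(arr, index_jin):
--     # menghapus elemen yang dihapus dengan menggeser seluruh elemen setelahnya ke kiri
--     for i in range(index_jin, array_length(arr)-1):
--         arr[i] = arr[i+1]
--     arr[array_length(arr)-1] = []
--
--     # menggeser elemen yang kosong ke kanan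
--     for i in range(len(arr)):
--         if not arr[i]:
--             j = i+1
--             while j < len(arr) and not arr[j]:
--                 j += 1
--             if j == len(arr):
--                 break
--             arr[i] = arr[j]
--             arr[j] = []
--     return arr
-- ===== SOURCE B (Python) =====
-- def geser_array(arr, index_jin):
--     # single pass: drop one row, keep the non-empty rows in order, pad with
--     # empty rows to the original length (mutates arr in place like A).
--     # Any index past the end deletes the last row (that is this function's
--     # contract for large indices); negative indices raise.
--     if index_jin < 0 or not arr:
--         raise IndexError("list index out of range")
--     n = len(arr)
--     i = min(index_jin, n - 1)
--     kept = [row for row in arr[:i] + arr[i + 1:] if row]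
--     arr[:] = kept + [[] for _ in range(n - len(kept))]
--     return arr
-- ===== Notes on version B (the rewrite author's own statement) =====
-- stated objective: faster
-- what changed: A shifts rows left one-by-one using a quadratic hand-rolled length helper and then bubbles empty rows right with a nested scan; B builds the result in one pass: slice out the deleted row (clamping a past-the-end index to the last row, as A effectively does), keep the non-empty rows in order, and pad with empty rows to the original length.
-- outside the precondition, e.g. on geser_array([[1], [2], [3]], -1): A returns [[2], [1], []], B raises IndexError; on geser_array([[1], [2], [3]], -2): A returns [[3], [1], []], B raises IndexError
import Mathlib
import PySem

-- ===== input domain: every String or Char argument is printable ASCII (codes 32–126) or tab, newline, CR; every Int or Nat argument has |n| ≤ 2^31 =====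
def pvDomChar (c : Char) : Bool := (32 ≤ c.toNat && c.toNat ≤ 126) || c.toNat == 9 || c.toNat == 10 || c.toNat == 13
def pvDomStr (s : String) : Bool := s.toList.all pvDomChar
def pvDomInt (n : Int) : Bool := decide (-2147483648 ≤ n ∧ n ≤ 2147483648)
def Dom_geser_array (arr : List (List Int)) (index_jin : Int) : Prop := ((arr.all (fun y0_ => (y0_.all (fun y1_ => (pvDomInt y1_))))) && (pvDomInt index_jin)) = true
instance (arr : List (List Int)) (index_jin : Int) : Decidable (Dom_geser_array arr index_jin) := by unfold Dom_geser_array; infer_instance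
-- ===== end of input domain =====

-- B removes the row at index_jin and compacts in one pass; equivalence is about the
-- RETURN value (both Pythons also mutate arr in place to that same value).

-- ===== PORT A =====

-- array_length's inner 'for i in range(count): temp_arr[i] = arr[i]'; the default []
-- of pyGetD is only reached where Python would raise IndexError (unreachable: count ≤ len(arr))
def pvBuildPrefix (arr : List (List Int)) (count : Nat) : List (List Int) :=
  (List.range count).map (fun i => PySem.List.pyGetD arr (Int.ofNat i) [])

-- the 'while temp_arr != arr' loop of array_length; the fuel arr.length + 1 only makes
-- the recursion total — the loop always exits before it runs out
def pvArrayLengthGo (arr : List (List Int)) (count : Nat) (temp : List (List Int)) : Nat → Nat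
  | 0 => count
  | fuel + 1 =>
    if temp = arr then count
    else pvArrayLengthGo arr (count + 1) (pvBuildPrefix arr (count + 1)) fuel

def pvArrayLength (arr : List (List Int)) : Int :=
  pvArrayLengthGo arr 0 [] (arr.length + 1)

-- 'while j < len(arr) and not arr[j]: j += 1'  (the short-circuit is the dite)
def pvFindJ (arr : List (List Int)) (j : Nat) : Nat :=
  if h : j < arr.length then
    if arr.getD j [] = [] then pvFindJ arr (j + 1) else j
  else j
termination_by arr.length - j

-- the compaction 'for i in range(len(arr))' loop with its break
def pvCompactLoop (n : Nat) (arr : List (List Int)) (i : Nat) : List (List Int) :=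
  if _h : i < n then
    if PySem.List.pyGetD arr (Int.ofNat i) [] = [] then
      let j := pvFindJ arr (i + 1)
      if j = arr.length then arr   -- break
      else pvCompactLoop n ((arr.set i (PySem.List.pyGetD arr (Int.ofNat j) [])).set j []) (i + 1)
    else pvCompactLoop n arr (i + 1)
  else arr
termination_by n - i

def geser_array (arr : List (List Int)) (index_jin : Int) : List (List Int) :=
  -- for i in range(index_jin, array_length(arr)-1): arr[i] = arr[i+1]
  let arr1 := (PySem.List.pyRange index_jin (pvArrayLength arr - 1) 1).foldl
      (fun acc i => PySem.List.pySetD acc i (PySem.List.pyGetD acc (i + 1) [])) arr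
  -- arr[array_length(arr)-1] = []
  let arr2 := PySem.List.pySetD arr1 (pvArrayLength arr1 - 1) []
  pvCompactLoop arr2.length arr2 0

-- ===== PORT B =====
-- Source B raises IndexError for a negative index or an empty arr; those inputs are outside Pre_
def geser_array_alt (arr : List (List Int)) (index_jin : Int) : List (List Int) :=
  let n := arr.length
  let i := min index_jin ((n : Int) - 1)
  let kept := (PySem.List.slice arr none (some i)
      ++ PySem.List.slice arr (some (i + 1)) none).filter (fun x => x ≠ [])
  kept ++ List.replicate (n - kept.length) []

-- ===== PRECONDITION & SPEC =====
-- Pre_ excludes negative index_jin — there A still returns a value (computed through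
-- Python's negative-index wraparound) while B, like del arr[i], raises IndexError —
-- and arr = [], where A itself raises IndexError.
def Pre_geser_array (arr : List (List Int)) (index_jin : Int) : Prop :=
  0 ≤ index_jin ∧ arr ≠ []
instance (arr : List (List Int)) (index_jin : Int) : Decidable (Pre_geser_array arr index_jin) := by
  unfold Pre_geser_array; infer_instance

def pvWitness_geser_array : List (List Int) × Int := ([[1], [], [2], [3]], 1)

def Spec_geser_array (arr : List (List Int)) (index_jin : Int) (out : List (List Int)) : Prop := out = geser_array_alt arr index_jin
instance (arr : List (List Int)) (index_jin : Int) (out : List (List Int)) : Decidable (Spec_geser_array arr index_jin out) := by unfold Spec_geser_array; infer_instance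

-- ===== CLAIM (what is proved, stated in full; the proofs are below) =====
def Claim_equal_geser_array : Prop := ∀ (arr : List (List Int)) (index_jin : Int), Dom_geser_array arr index_jin → Pre_geser_array arr index_jin → Spec_geser_array arr index_jin (geser_array arr index_jin)

-- ===== LEMMAS AND PROOFS =====

lemma pvBuildPrefix_eq_take (arr : List (List Int)) (count : Nat) (h : count ≤ arr.length) :
    pvBuildPrefix arr count = arr.take count := by
  apply List.ext_getElem
  · simp [pvBuildPrefix, h]
  · intro k h1 h2
    simp only [pvBuildPrefix, List.length_map, List.length_range] at h1
    rw [List.getElem_take]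
    simp only [pvBuildPrefix, List.getElem_map, List.getElem_range]
    rw [show Int.ofNat k = (k : Int) from rfl, PySem.List.pyGetD_natCast,
      List.getD_eq_getElem _ _ (by omega)]

lemma pvArrayLength_eq (arr : List (List Int)) : pvArrayLength arr = (arr.length : Int) := by
  have key : ∀ fuel count, count ≤ arr.length → arr.length - count < fuel →
      pvArrayLengthGo arr count (arr.take count) fuel = arr.length := by
    intro fuel
    induction fuel with
    | zero => intro count _ hf; omega
    | succ f ih =>
      intro count hc hf
      rw [pvArrayLengthGo]
      by_cases he : arr.take count = arr
      · have : arr.length ≤ count := by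
          conv_lhs => rw [← he]
          simp
        simp [he]; omega
      · have hlt : count < arr.length := by
          rcases Nat.lt_or_ge count arr.length with h | h
          · exact h
          · exact absurd (List.take_of_length_le h) he
        rw [if_neg he, pvBuildPrefix_eq_take arr (count + 1) (by omega)]
        exact ih (count + 1) (by omega) (by omega)
  unfold pvArrayLength
  rw [show ([] : List (List Int)) = arr.take 0 by simp, key (arr.length + 1) 0 (by omega) (by omega)]

lemma set_take_succ (arr : List (List Int)) (a : Nat) (v : List Int) (h : a < arr.length) :
    (arr.set a v).take (a+1) = arr.take a ++ [v] := by
  rw [List.take_set, List.take_add_one, List.getElem?_eq_getElem h, List.set_append]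
  simp [List.length_take, Nat.min_eq_left (Nat.le_of_lt h)]

lemma take_succ_getElem (arr : List (List Int)) (a : Nat) (h : a < arr.length) :
    arr.take (a+1) = arr.take a ++ [arr[a]'h] := by
  rw [List.take_add_one, List.getElem?_eq_getElem h]
  rfl

lemma shift_loop (arr0 : List (List Int)) (a0 : Nat) (h : a0 < arr0.length) :
    (PySem.List.pyRange (a0 : Int) ((arr0.length : Int) - 1) 1).foldl
      (fun acc i => PySem.List.pySetD acc i (PySem.List.pyGetD acc (i + 1) [])) arr0
    = arr0.take a0 ++ arr0.drop (a0 + 1) ++ arr0.drop (arr0.length - 1) := by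
  have key : ∀ k (arr : List (List Int)) (a : Nat), a < arr.length → arr.length - 1 - a = k →
      (PySem.List.pyRange (a : Int) ((arr.length : Int) - 1) 1).foldl
        (fun acc i => PySem.List.pySetD acc i (PySem.List.pyGetD acc (i + 1) [])) arr
      = arr.take a ++ arr.drop (a + 1) ++ arr.drop (arr.length - 1) := by
    intro k
    induction k with
    | zero =>
      intro arr a ha hk
      have hl : a = arr.length - 1 := by omega
      subst hl
      rw [PySem.List.pyRange_one_eq_nil (by omega)]
      simp only [List.foldl_nil]
      rw [List.drop_of_length_le (show arr.length ≤ arr.length - 1 + 1 by omega)]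
      conv_lhs => rw [← List.take_append_drop (arr.length - 1) arr]
      simp
    | succ k ih =>
      intro arr a ha hk
      rw [PySem.List.pyRange_one_cons (by omega), List.foldl_cons]
      have ha1 : a + 1 < arr.length := by omega
      have hstep : PySem.List.pySetD arr (a : Int) (PySem.List.pyGetD arr ((a : Int) + 1) [])
          = arr.set a (arr[a+1]'ha1) := by
        rw [show ((a : Int) + 1) = ((a + 1 : Nat) : Int) by push_cast; ring]
        rw [PySem.List.pyGetD_natCast, PySem.List.pySetD_natCast,
          List.getD_eq_getElem _ _ ha1]
      rw [hstep]
      have hlen : (arr.set a (arr[a+1]'ha1)).length = arr.length := by simp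
      have hrec := ih (arr.set a (arr[a+1]'ha1)) (a+1) (by rw [hlen]; omega) (by rw [hlen]; omega)
      rw [hlen] at hrec
      rw [show ((a:Int)+1) = ((a+1:Nat):Int) by push_cast; ring, hrec]
      rw [set_take_succ arr a _ (by omega)]
      rw [List.drop_set, if_pos (by omega), List.drop_set, if_pos (by omega)]
      have hd : arr.drop (a+1) = arr[a+1]'ha1 :: arr.drop (a+1+1) := by
        rw [List.drop_eq_getElem_cons ha1]
      conv_rhs => rw [hd]
      simp
  exact key (arr0.length - 1 - a0) arr0 a0 h rfl

-- what the compaction produces from a suffix: its non-empty rows in order, then empties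
def pvSpec (cs : List (List Int)) : List (List Int) :=
  cs.filter (fun x => x ≠ []) ++ List.replicate (cs.length - (cs.filter (fun x => x ≠ [])).length) []

lemma pvSpec_nil : pvSpec [] = [] := by simp [pvSpec]

lemma pvSpec_cons_ne (x : List Int) (cs : List (List Int)) (hx : x ≠ []) :
    pvSpec (x :: cs) = x :: pvSpec cs := by
  have hf : (List.filter (fun x => x ≠ []) cs).length ≤ cs.length := List.length_filter_le _ _
  simp [pvSpec, hx]

lemma pvSpec_all_empty (cs : List (List Int)) (h : ∀ x ∈ cs, x = ([] : List Int)) :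
    pvSpec cs = cs := by
  have hf : cs.filter (fun x => x ≠ []) = [] := by
    rw [List.filter_eq_nil_iff]
    intro a ha
    simp [h a ha]
  rw [pvSpec, hf]
  simp only [List.nil_append, List.length_nil, Nat.sub_zero]
  exact (List.eq_replicate_iff.2 ⟨rfl, h⟩).symm

lemma decompose (cs : List (List Int)) (m : Nat) (hm : m < cs.length)
    (hall : ∀ k, k < m → cs.getD k [] = []) :
    cs = List.replicate m [] ++ cs[m]'hm :: cs.drop (m+1) := by
  induction m generalizing cs with
  | zero => simpa using (List.drop_eq_getElem_cons hm).symm.symm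
  | succ m ih =>
    match cs with
    | c :: cs' =>
      have hc : c = [] := by have := hall 0 (by omega); simpa using this
      have := ih cs' (by simpa using hm) (fun k hk => by
        have := hall (k+1) (by omega); simpa using this)
      simp only [List.replicate_succ, List.cons_append]
      rw [hc]
      congr 1

lemma pvSpec_pull (cs : List (List Int)) (m : Nat) (hm : m < cs.length)
    (hall : ∀ k, k < m → cs.getD k [] = []) (hne : cs[m]'hm ≠ []) :
    pvSpec ([] :: cs) = cs[m]'hm :: pvSpec (cs.set m []) := by
  have hd := decompose cs m hm hall
  have hset : cs.set m [] = List.replicate (m+1) [] ++ cs.drop (m+1) := by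
    conv_lhs => rw [hd]
    rw [List.set_append, if_neg (by simp), List.length_replicate, Nat.sub_self,
      List.set_cons_zero, List.replicate_succ']
    simp [List.append_assoc]
  have hfc : cs.filter (fun x => x ≠ []) = cs[m]'hm :: (cs.drop (m+1)).filter (fun x => x ≠ []) := by
    conv_lhs => rw [hd]
    rw [List.filter_append, List.filter_replicate, List.filter_cons]
    simp [hne]
  have hfset : (cs.set m []).filter (fun x => x ≠ []) = (cs.drop (m+1)).filter (fun x => x ≠ []) := by
    rw [hset]
    simp [List.filter_append]
  have hflen : ((cs.drop (m+1)).filter (fun x => x ≠ [])).length ≤ cs.length - (m+1) := by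
    have := List.length_filter_le (fun x => decide (x ≠ [])) (cs.drop (m+1))
    simp at this ⊢
    omega
  rw [pvSpec, pvSpec]
  rw [show List.filter (fun x => decide (x ≠ [])) ([] :: cs) = List.filter (fun x => decide (x ≠ [])) cs by simp]
  rw [hfc, hfset, List.length_set, List.length_cons, List.cons_append]
  congr 2
  rw [List.length_cons]
  congr 1
  omega

lemma findJ_spec (arr : List (List Int)) (j : Nat) (hj : j ≤ arr.length) :
    j ≤ pvFindJ arr j ∧ pvFindJ arr j ≤ arr.length ∧
    (∀ k, j ≤ k → k < pvFindJ arr j → arr.getD k [] = []) ∧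
    (pvFindJ arr j < arr.length → arr.getD (pvFindJ arr j) [] ≠ []) := by
  have key : ∀ m j, j ≤ arr.length → arr.length - j = m →
      j ≤ pvFindJ arr j ∧ pvFindJ arr j ≤ arr.length ∧
      (∀ k, j ≤ k → k < pvFindJ arr j → arr.getD k [] = []) ∧
      (pvFindJ arr j < arr.length → arr.getD (pvFindJ arr j) [] ≠ []) := by
    intro m
    induction m with
    | zero =>
      intro j hjle hm
      rw [pvFindJ, dif_neg (by omega)]
      exact ⟨le_refl _, by omega, fun k h1 h2 => absurd (lt_of_le_of_lt h1 h2) (lt_irrefl _),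
        fun hh => absurd hh (by omega)⟩
    | succ m ih =>
      intro j hjle hm
      rw [pvFindJ, dif_pos (by omega : j < arr.length)]
      by_cases he : arr.getD j [] = []
      · rw [if_pos he]
        obtain ⟨h1, h2, h3, h4⟩ := ih (j+1) (by omega) (by omega)
        refine ⟨by omega, h2, ?_, h4⟩
        intro k hk1 hk2
        rcases Nat.eq_or_lt_of_le hk1 with rfl | h
        · exact he
        · exact h3 k h hk2
      · rw [if_neg he]
        exact ⟨le_refl _, by omega, fun k h1 h2 => absurd (lt_of_le_of_lt h1 h2) (lt_irrefl _),
          fun _ => he⟩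
  exact key (arr.length - j) j hj rfl

lemma set_last_append (xs : List (List Int)) (c v : List Int) :
    (xs ++ [c]).set xs.length v = xs ++ [v] := by
  rw [List.set_append, if_neg (by simp), Nat.sub_self, List.set_cons_zero]

lemma compact_loop_spec (arr0 : List (List Int)) (i0 : Nat) :
    pvCompactLoop arr0.length arr0 i0 = arr0.take i0 ++ pvSpec (arr0.drop i0) := by
  have key : ∀ m (arr : List (List Int)) (i : Nat), arr0.length = arr.length → arr.length - i = m →
      pvCompactLoop arr.length arr i = arr.take i ++ pvSpec (arr.drop i) := by
    intro m
    induction m with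
    | zero =>
      intro arr i hn hm
      rw [pvCompactLoop, dif_neg (by omega)]
      rw [List.take_of_length_le (by omega), List.drop_of_length_le (by omega), pvSpec_nil,
        List.append_nil]
    | succ m ih =>
      intro arr i hn hm
      have hi : i < arr.length := by omega
      rw [pvCompactLoop, dif_pos hi]
      have hget : PySem.List.pyGetD arr (Int.ofNat i) [] = arr[i]'hi := by
        rw [show Int.ofNat i = (i : Int) from rfl, PySem.List.pyGetD_natCast,
          List.getD_eq_getElem _ _ hi]
      rw [hget]
      have hdropi : arr.drop i = arr[i]'hi :: arr.drop (i+1) := List.drop_eq_getElem_cons hi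
      by_cases he : arr[i]'hi = []
      · rw [if_pos he]
        obtain ⟨hj1, hj2, hj3, hj4⟩ := findJ_spec arr (i+1) (by omega)
        by_cases hb : pvFindJ arr (i+1) = arr.length
        · rw [if_pos hb]
          have hall : ∀ x ∈ arr.drop i, x = ([] : List Int) := by
            intro x hx
            rw [List.mem_iff_getElem] at hx
            obtain ⟨k, hk, rfl⟩ := hx
            rw [List.getElem_drop]
            by_cases hki : k = 0
            · subst hki; simpa using he
            · have := hj3 (i + k) (by omega) (by rw [List.length_drop] at hk; omega)
              rw [List.getD_eq_getElem _ _ (by rw [List.length_drop] at hk; omega)] at this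
              simpa using this
          rw [pvSpec_all_empty _ hall, List.take_append_drop]
        · rw [if_neg hb]
          set j := pvFindJ arr (i+1) with hjdef
          have hjlt : j < arr.length := by omega
          have hgj : PySem.List.pyGetD arr (Int.ofNat j) [] = arr[j]'hjlt := by
            rw [show Int.ofNat j = (j : Int) from rfl, PySem.List.pyGetD_natCast,
              List.getD_eq_getElem _ _ hjlt]
          rw [hgj]
          set arr' := (arr.set i (arr[j]'hjlt)).set j [] with harr'
          have hlen' : arr'.length = arr.length := by simp [harr']
          have hrec := ih arr' (i+1) (by omega) (by omega)
          rw [hlen'] at hrec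
          rw [hrec]
          have htake : arr'.take (i+1) = arr.take i ++ [arr[j]'hjlt] := by
            rw [harr', List.take_set, set_take_succ _ _ _ hi,
              List.set_eq_of_length_le (by simp [List.length_take]; omega)]
          have hdrop : arr'.drop (i+1) = (arr.drop (i+1)).set (j - (i+1)) [] := by
            rw [harr', List.drop_set, if_neg (by omega), List.drop_set, if_pos (by omega)]
          rw [htake, hdrop, hdropi, he]
          have hm2 : j - (i+1) < (arr.drop (i+1)).length := by
            rw [List.length_drop]; omega
          have hcsm : (arr.drop (i+1))[j - (i+1)]'hm2 = arr[j]'hjlt := by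
            rw [List.getElem_drop]
            congr 1
            omega
          rw [pvSpec_pull (arr.drop (i+1)) (j - (i+1)) hm2 ?hall
              (by rw [hcsm]; have := hj4 hjlt; rwa [List.getD_eq_getElem _ _ hjlt] at this), hcsm]
          · rw [List.append_assoc]; rfl
          case hall =>
            intro k hk
            rw [List.getD_eq_getElem _ _ (by rw [List.length_drop]; omega)]
            have := hj3 (i + 1 + k) (by omega) (by omega)
            rw [List.getD_eq_getElem _ _ (by omega)] at this
            simpa using this
      · rw [if_neg he]
        have hrec := ih arr (i+1) hn (by omega)
        rw [hrec, hdropi, pvSpec_cons_ne _ _ he]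
        rw [take_succ_getElem arr i hi, List.append_assoc]
        rfl
  exact key (arr0.length - i0) arr0 i0 rfl rfl

-- ===== VERDICT (by name: the statement is the Claim_ definition above) =====
theorem geser_array_spec : Claim_equal_geser_array := by
  intro arr index_jin _hdom hpre
  obtain ⟨h0, hne⟩ := hpre
  have hlen1 : 1 ≤ arr.length := List.length_pos_of_ne_nil hne
  unfold Spec_geser_array geser_array geser_array_alt
  dsimp only
  set i := min index_jin ((arr.length : Int) - 1) with hi
  have hi0 : 0 ≤ i := le_min h0 (by omega)
  set idx := i.toNat with hidx
  have hii : i = (idx : Int) := (Int.toNat_of_nonneg hi0).symm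
  have hidxlt : idx < arr.length := by
    have h1 : i ≤ (arr.length : Int) - 1 := min_le_right _ _
    omega
  -- phase 1 (the left-shift loop): its result for any admissible index_jin
  have harr1 : (PySem.List.pyRange index_jin ((arr.length : Int) - 1) 1).foldl
      (fun acc k => PySem.List.pySetD acc k (PySem.List.pyGetD acc (k + 1) [])) arr
      = arr.take idx ++ arr.drop (idx + 1) ++ arr.drop (arr.length - 1) := by
    rcases le_or_gt index_jin ((arr.length : Int) - 1) with hle | hgt
    · have hmi : i = index_jin := min_eq_left hle
      rw [← hmi, hii]
      exact shift_loop arr idx hidxlt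
    · -- the range is empty; the clamped index is the last position
      rw [PySem.List.pyRange_one_eq_nil (le_of_lt hgt)]
      simp only [List.foldl_nil]
      have hieq : idx = arr.length - 1 := by
        have hmr : i = (arr.length : Int) - 1 := min_eq_right (le_of_lt hgt)
        rw [hii] at hmr
        omega
      rw [hieq, show arr.length - 1 + 1 = arr.length from by omega, List.drop_length]
      conv_lhs => rw [← List.take_append_drop (arr.length - 1) arr]
      simp
  rw [pvArrayLength_eq, harr1]
  set X := arr.take idx ++ arr.drop (idx + 1) ++ arr.drop (arr.length - 1) with hX
  have hXlen : X.length = arr.length := by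
    rw [hX]
    simp only [List.length_append, List.length_take, List.length_drop]
    omega
  have hAB : (arr.take idx ++ arr.drop (idx + 1)).length = arr.length - 1 := by
    simp only [List.length_append, List.length_take, List.length_drop]
    omega
  have hC : arr.drop (arr.length - 1) = [arr[arr.length - 1]'(by omega)] := by
    rw [List.drop_eq_getElem_cons (by omega : arr.length - 1 < arr.length)]
    rw [show arr.length - 1 + 1 = arr.length by omega, List.drop_length]
  -- arr[array_length(arr)-1] = []
  have hset : PySem.List.pySetD X (pvArrayLength X - 1) []
      = arr.take idx ++ arr.drop (idx + 1) ++ [[]] := by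
    rw [pvArrayLength_eq X, show ((X.length : Int) - 1) = ((X.length - 1 : Nat) : Int) by
      rw [hXlen]; omega]
    rw [PySem.List.pySetD_natCast,
      show X.length - 1 = (arr.take idx ++ arr.drop (idx + 1)).length by rw [hXlen, hAB],
      hX, hC, set_last_append]
  rw [hset]
  set Y := arr.take idx ++ arr.drop (idx + 1) ++ [[]] with hY
  have hYlen : Y.length = arr.length := by
    rw [hY]
    simp only [List.length_append, List.length_take, List.length_drop, List.length_cons,
      List.length_nil]
    omega
  rw [compact_loop_spec Y 0, List.take_zero, List.drop_zero, List.nil_append]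
  -- the B side: slices are take/drop
  have hs1 : PySem.List.slice arr none (some i) = arr.take idx := by
    rw [hii]; exact PySem.List.slice_to_natCast arr idx
  have hs2 : PySem.List.slice arr (some (i + 1)) none = arr.drop (idx + 1) := by
    rw [hii, show (((idx : Nat) : Int) + 1) = (((idx + 1 : Nat) : Nat) : Int) by push_cast; ring]
    exact PySem.List.slice_from_natCast arr (idx + 1)
  rw [hs1, hs2]
  -- pvSpec of (kept-source ++ [[]]) is exactly B's kept ++ padding
  have hfY : Y.filter (fun x => x ≠ []) = (arr.take idx ++ arr.drop (idx + 1)).filter (fun x => x ≠ []) := by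
    rw [hY, List.filter_append (l₂ := [([] : List Int)])]
    simp
  rw [pvSpec, hfY, hYlen]
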